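-- pv_equiv track=rewrite | github.com/PabloJC/Cifrado-y-Descifrado-de-Imagenes | Criptosistema.py | generate_l_sequences
-- ===== SOURCE A (Python) =====
-- def systemX (a,b,c,k1,k2,InX):
-- 	OutX = [0,0,0,0,0,0]
-- 	OutX[0] = (a * (InX[1] - InX[0])) % (256)
-- 	OutX[1] = (b * InX[0] - InX[1] - InX[0] * InX[2] + k1 * (InX[3] - InX[4])) % (256)
-- 	OutX[2] = (InX[0] * InX[1] - c * InX[2]) % (256)
-- 	OutX[3] = (a * (InX[4] - InX[3])) % (256)
-- 	OutX[4] = (b * InX[3] - InX[4] - InX[3] * InX[5] + k2 * (InX[0] - InX[1])) % (256)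
-- 	OutX[5] = (InX[3] * InX[4] - c * InX[5]) % (256)
-- 	return OutX
--
-- def generate_l_sequences(a,b,c,k1,k2,InX,l,M,N):
--
-- 	Out_Seq = [[InX[0]],[InX[1]],[InX[2]],[InX[3]],[InX[4]],[InX[5]]]
-- 	seq_In = InX
-- 	sequence_size = 2
--
-- 	while sequence_size <= (l + 2 * M * N):
--
-- 		seq_Out = systemX(a,b,c,k1,k2,seq_In)
-- 		seq_In = seq_Out
-- 		seq1 = Out_Seq[0]
-- 		seq1.append(seq_Out[0])
-- 		seq2 = Out_Seq[1]
-- 		seq2.append(seq_Out[1])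
-- 		seq3 = Out_Seq[2]
-- 		seq3.append(seq_Out[2])
-- 		seq4 = Out_Seq[3]
-- 		seq4.append(seq_Out[3])
-- 		seq5 = Out_Seq[4]
-- 		seq5.append(seq_Out[4])
-- 		seq6 = Out_Seq[5]
-- 		seq6.append(seq_Out[5])
-- 		Out_Seq	= [seq1,seq2,seq3,seq4,seq5,seq6]
-- 		sequence_size = sequence_size + 1
-- 	return Out_Seq
-- ===== SOURCE B (Python) =====
-- def generate_l_sequences(a, b, c, k1, k2, InX, l, M, N):
--     n = 1 + max(0, l + 2 * M * N - 1)  # entries per sequence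
--     x = (InX[0], InX[1], InX[2], InX[3], InX[4], InX[5])
--     traj = [x]
--     seen = {x: 0}
--     while len(traj) < n:
--         x0, x1, x2, x3, x4, x5 = x
--         x = ((a * (x1 - x0)) % 256,
--              (b * x0 - x1 - x0 * x2 + k1 * (x3 - x4)) % 256,
--              (x0 * x1 - c * x2) % 256,
--              (a * (x4 - x3)) % 256,
--              (b * x3 - x4 - x3 * x5 + k2 * (x0 - x1)) % 256,
--              (x3 * x4 - c * x5) % 256)
--         if x in seen:
--             # cycle found: the rest of the trajectory is periodic
--             s = seen[x]
--             p = len(traj) - s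
--             while len(traj) < n:
--                 traj.append(traj[s + (len(traj) - s) % p])
--             break
--         seen[x] = len(traj)
--         traj.append(x)
--     return [[t[i] for t in traj] for i in range(6)]
-- ===== Notes on version B (the rewrite author's own statement) =====
-- stated objective: alternative
-- what changed: B detects the first repeated state with a seen-dict (the mod-256 map is deterministic on a finite state space), stops iterating the map there, and fills the remaining entries by periodic indexing into the recorded trajectory prefix, then transposes once; A re-runs the map every step and appends to six parallel lists.
import Mathlib
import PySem

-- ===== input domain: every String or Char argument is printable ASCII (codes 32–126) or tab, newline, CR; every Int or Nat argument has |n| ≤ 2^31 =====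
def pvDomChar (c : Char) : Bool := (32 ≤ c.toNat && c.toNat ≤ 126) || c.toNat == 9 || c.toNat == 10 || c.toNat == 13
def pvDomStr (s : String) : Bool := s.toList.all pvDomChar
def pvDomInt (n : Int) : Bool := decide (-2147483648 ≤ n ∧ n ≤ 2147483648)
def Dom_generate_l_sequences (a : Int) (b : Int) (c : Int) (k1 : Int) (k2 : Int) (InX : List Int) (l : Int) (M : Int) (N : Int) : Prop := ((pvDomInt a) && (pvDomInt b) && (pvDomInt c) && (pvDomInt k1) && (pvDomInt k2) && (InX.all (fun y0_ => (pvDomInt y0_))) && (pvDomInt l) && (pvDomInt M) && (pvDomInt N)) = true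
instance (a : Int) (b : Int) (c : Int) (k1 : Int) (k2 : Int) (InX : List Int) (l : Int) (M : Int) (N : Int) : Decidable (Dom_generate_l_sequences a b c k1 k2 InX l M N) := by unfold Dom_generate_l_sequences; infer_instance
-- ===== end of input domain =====

-- B detects the first repeated state with a seen-dict and fills the rest of the
-- trajectory by periodic indexing into the recorded prefix, instead of A's
-- step-by-step iteration appending to six parallel lists (alternative algorithm).

-- ===== PORT A =====
-- systemX, literal: indexes seq_In[0..5]; under Pre_ (length ≥ 6) pyGetD is exact.
def systemX (a b c k1 k2 : Int) (InX : List Int) : List Int :=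
  [ PySem.Int.mod (a * (PySem.List.pyGetD InX 1 0 - PySem.List.pyGetD InX 0 0)) 256,
    PySem.Int.mod (b * PySem.List.pyGetD InX 0 0 - PySem.List.pyGetD InX 1 0 - PySem.List.pyGetD InX 0 0 * PySem.List.pyGetD InX 2 0 + k1 * (PySem.List.pyGetD InX 3 0 - PySem.List.pyGetD InX 4 0)) 256,
    PySem.Int.mod (PySem.List.pyGetD InX 0 0 * PySem.List.pyGetD InX 1 0 - c * PySem.List.pyGetD InX 2 0) 256,
    PySem.Int.mod (a * (PySem.List.pyGetD InX 4 0 - PySem.List.pyGetD InX 3 0)) 256,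
    PySem.Int.mod (b * PySem.List.pyGetD InX 3 0 - PySem.List.pyGetD InX 4 0 - PySem.List.pyGetD InX 3 0 * PySem.List.pyGetD InX 5 0 + k2 * (PySem.List.pyGetD InX 0 0 - PySem.List.pyGetD InX 1 0)) 256,
    PySem.Int.mod (PySem.List.pyGetD InX 3 0 * PySem.List.pyGetD InX 4 0 - c * PySem.List.pyGetD InX 5 0) 256 ]

-- the while loop: fuel = number of iterations (sequence_size runs 2..l+2MN)
def loopA (a b c k1 k2 : Int) : Nat → List Int → List Int → List Int → List Int → List Int → List Int → List Int → List (List Int)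
  | 0, _, s1, s2, s3, s4, s5, s6 => [s1, s2, s3, s4, s5, s6]
  | n+1, seqIn, s1, s2, s3, s4, s5, s6 =>
    let out := systemX a b c k1 k2 seqIn
    loopA a b c k1 k2 n out
      (s1 ++ [PySem.List.pyGetD out 0 0]) (s2 ++ [PySem.List.pyGetD out 1 0])
      (s3 ++ [PySem.List.pyGetD out 2 0]) (s4 ++ [PySem.List.pyGetD out 3 0])
      (s5 ++ [PySem.List.pyGetD out 4 0]) (s6 ++ [PySem.List.pyGetD out 5 0])

def generate_l_sequences (a : Int) (b : Int) (c : Int) (k1 : Int) (k2 : Int) (InX : List Int) (l : Int) (M : Int) (N : Int) : List (List Int) :=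
  loopA a b c k1 k2 (l + 2 * M * N - 1).toNat InX
    [PySem.List.pyGetD InX 0 0] [PySem.List.pyGetD InX 1 0] [PySem.List.pyGetD InX 2 0]
    [PySem.List.pyGetD InX 3 0] [PySem.List.pyGetD InX 4 0] [PySem.List.pyGetD InX 5 0]

-- ===== PORT B =====
abbrev St : Type := Int × Int × Int × Int × Int × Int

def stepB (a b c k1 k2 : Int) : St → St
  | (x0, x1, x2, x3, x4, x5) =>
    ( PySem.Int.mod (a * (x1 - x0)) 256,
      PySem.Int.mod (b * x0 - x1 - x0 * x2 + k1 * (x3 - x4)) 256,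
      PySem.Int.mod (x0 * x1 - c * x2) 256,
      PySem.Int.mod (a * (x4 - x3)) 256,
      PySem.Int.mod (b * x3 - x4 - x3 * x5 + k2 * (x0 - x1)) 256,
      PySem.Int.mod (x3 * x4 - c * x5) 256 )

-- the inner fill loop: `while len(traj) < n: traj.append(traj[s + (len(traj)-s) % p])`.
-- The index s + (len-s) % p is a nonnegative in-range index, where Python's traj[i] is List.getD.
def fillB (n s p : Nat) : Nat → List St → List St
  | 0, traj => traj
  | fuel+1, traj =>
    if traj.length < n then
      fillB n s p fuel (traj ++ [traj.getD (s + (traj.length - s) % p) (0, 0, 0, 0, 0, 0)])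
    else traj

-- the main while loop with the seen-dict; on a repeated state it breaks into fillB
def loopB (a b c k1 k2 : Int) (n : Nat) : Nat → List St → PySem.Dict St Nat → St → List St
  | 0, traj, _, _ => traj
  | fuel+1, traj, seen, x =>
    if traj.length < n then
      let y := stepB a b c k1 k2 x
      match seen.get? y with
      | some s => fillB n s (traj.length - s) (n - traj.length) traj
      | none => loopB a b c k1 k2 n fuel (traj ++ [y]) (seen.insert y traj.length) y
    else traj

def generate_l_sequences_alt (a : Int) (b : Int) (c : Int) (k1 : Int) (k2 : Int) (InX : List Int) (l : Int) (M : Int) (N : Int) : List (List Int) :=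
  let n : Nat := 1 + (l + 2 * M * N - 1).toNat      -- n = 1 + max(0, l + 2*M*N - 1)
  let x0 : St := (PySem.List.pyGetD InX 0 0, PySem.List.pyGetD InX 1 0, PySem.List.pyGetD InX 2 0,
                  PySem.List.pyGetD InX 3 0, PySem.List.pyGetD InX 4 0, PySem.List.pyGetD InX 5 0)
  let traj := loopB a b c k1 k2 n n [x0] (PySem.Dict.empty.insert x0 0) x0
  [ traj.map (fun s => s.1), traj.map (fun s => s.2.1), traj.map (fun s => s.2.2.1),
    traj.map (fun s => s.2.2.2.1), traj.map (fun s => s.2.2.2.2.1), traj.map (fun s => s.2.2.2.2.2) ]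

-- ===== PRECONDITION & SPEC =====
-- Pre_: Python A indexes InX[0]..InX[5], so it raises IndexError unless len(InX) ≥ 6.
def Pre_generate_l_sequences (a : Int) (b : Int) (c : Int) (k1 : Int) (k2 : Int) (InX : List Int) (l : Int) (M : Int) (N : Int) : Prop := 6 ≤ InX.length
instance (a : Int) (b : Int) (c : Int) (k1 : Int) (k2 : Int) (InX : List Int) (l : Int) (M : Int) (N : Int) : Decidable (Pre_generate_l_sequences a b c k1 k2 InX l M N) := by unfold Pre_generate_l_sequences; infer_instance

def pvWitness_generate_l_sequences : Int × Int × Int × Int × Int × List Int × Int × Int × Int := (3, 5, 7, 2, 4, [1, 2, 3, 4, 5, 6], 2, 1, 1)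

def Spec_generate_l_sequences (a : Int) (b : Int) (c : Int) (k1 : Int) (k2 : Int) (InX : List Int) (l : Int) (M : Int) (N : Int) (out : List (List Int)) : Prop := out = generate_l_sequences_alt a b c k1 k2 InX l M N
instance (a : Int) (b : Int) (c : Int) (k1 : Int) (k2 : Int) (InX : List Int) (l : Int) (M : Int) (N : Int) (out : List (List Int)) : Decidable (Spec_generate_l_sequences a b c k1 k2 InX l M N out) := by unfold Spec_generate_l_sequences; infer_instance

-- ===== CLAIM (what is proved, stated in full; the proofs are below) =====
def Claim_equal_generate_l_sequences : Prop := ∀ (a : Int) (b : Int) (c : Int) (k1 : Int) (k2 : Int) (InX : List Int) (l : Int) (M : Int) (N : Int), Dom_generate_l_sequences a b c k1 k2 InX l M N → Pre_generate_l_sequences a b c k1 k2 InX l M N → Spec_generate_l_sequences a b c k1 k2 InX l M N (generate_l_sequences a b c k1 k2 InX l M N)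

-- ===== LEMMAS AND PROOFS =====

-- A's seq_In agrees with the tuple state on indices 0..5
def agrees (xs : List Int) (t : St) : Prop :=
  PySem.List.pyGetD xs 0 0 = t.1 ∧ PySem.List.pyGetD xs 1 0 = t.2.1 ∧
  PySem.List.pyGetD xs 2 0 = t.2.2.1 ∧ PySem.List.pyGetD xs 3 0 = t.2.2.2.1 ∧
  PySem.List.pyGetD xs 4 0 = t.2.2.2.2.1 ∧ PySem.List.pyGetD xs 5 0 = t.2.2.2.2.2

lemma systemX_agrees (a b c k1 k2 : Int) (xs : List Int) (t : St) (h : agrees xs t) :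
    systemX a b c k1 k2 xs =
      [(stepB a b c k1 k2 t).1, (stepB a b c k1 k2 t).2.1, (stepB a b c k1 k2 t).2.2.1,
       (stepB a b c k1 k2 t).2.2.2.1, (stepB a b c k1 k2 t).2.2.2.2.1, (stepB a b c k1 k2 t).2.2.2.2.2] := by
  obtain ⟨t0, t1, t2, t3, t4, t5⟩ := t
  obtain ⟨h0, h1, h2, h3, h4, h5⟩ := h
  simp only [systemX, stepB, h0, h1, h2, h3, h4, h5]

lemma agrees_lit (t : St) :
    agrees [t.1, t.2.1, t.2.2.1, t.2.2.2.1, t.2.2.2.2.1, t.2.2.2.2.2] t := by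
  obtain ⟨t0, t1, t2, t3, t4, t5⟩ := t
  refine ⟨?_, ?_, ?_, ?_, ?_, ?_⟩ <;> simp [PySem.List.pyGetD, PySem.List.pyGet?, PySem.List.pyIdx?]

-- successive states of A's loop as a list (A-side characterisation)
def iterSt (a b c k1 k2 : Int) : Nat → St → List St
  | 0, _ => []
  | n+1, x => let y := stepB a b c k1 k2 x; y :: iterSt a b c k1 k2 n y

lemma loopA_eq (a b c k1 k2 : Int) (n : Nat) (xs : List Int) (t : St)
    (h : agrees xs t) (s1 s2 s3 s4 s5 s6 : List Int) :
    loopA a b c k1 k2 n xs s1 s2 s3 s4 s5 s6 =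
      [ s1 ++ (iterSt a b c k1 k2 n t).map (fun s => s.1),
        s2 ++ (iterSt a b c k1 k2 n t).map (fun s => s.2.1),
        s3 ++ (iterSt a b c k1 k2 n t).map (fun s => s.2.2.1),
        s4 ++ (iterSt a b c k1 k2 n t).map (fun s => s.2.2.2.1),
        s5 ++ (iterSt a b c k1 k2 n t).map (fun s => s.2.2.2.2.1),
        s6 ++ (iterSt a b c k1 k2 n t).map (fun s => s.2.2.2.2.2) ] := by
  induction n generalizing xs t s1 s2 s3 s4 s5 s6 with
  | zero => simp [loopA, iterSt]
  | succ n ih =>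
    have hx := systemX_agrees a b c k1 k2 xs t h
    simp only [loopA, iterSt, hx]
    rw [ih _ (stepB a b c k1 k2 t) (agrees_lit _)]
    simp [PySem.List.pyGetD, PySem.List.pyGet?, PySem.List.pyIdx?]

lemma iterSt_eq_map (a b c k1 k2 : Int) (n : Nat) (t : St) :
    iterSt a b c k1 k2 n t = (List.range n).map (fun i => (stepB a b c k1 k2)^[i+1] t) := by
  induction n generalizing t with
  | zero => simp [iterSt]
  | succ n ih =>
    rw [List.range_succ_eq_map, List.map_cons, List.map_map, iterSt, ih]
    refine congrArg₂ _ (by simp) ?_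
    refine List.map_congr_left fun i _ => ?_
    simp only [Function.comp_apply]
    exact (Function.iterate_succ_apply (stepB a b c k1 k2) (i+1) t).symm

-- full state list of length 1+n, seed included
lemma cons_iterSt (a b c k1 k2 : Int) (n : Nat) (x0 : St) :
    x0 :: iterSt a b c k1 k2 n x0 = (List.range (1+n)).map (fun i => (stepB a b c k1 k2)^[i] x0) := by
  rw [Nat.add_comm, List.range_succ_eq_map, List.map_cons, List.map_map, iterSt_eq_map]
  refine congrArg₂ _ (by simp) ?_
  exact (List.map_congr_left fun i _ => rfl)

-- periodicity: once the trajectory repeats, indices reduce mod the period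
lemma iter_mod {α : Type} (f : α → α) (x : α) (s p : Nat) (hp : 0 < p)
    (h : f^[s+p] x = f^[s] x) : ∀ k, f^[s+k] x = f^[s + k % p] x := by
  intro k
  induction k using Nat.strong_induction_on with
  | _ k ih =>
    by_cases hk : k < p
    · rw [Nat.mod_eq_of_lt hk]
    · have hk' : p ≤ k := Nat.le_of_not_lt hk
      have h1 : s + k = (k - p) + (s + p) := by omega
      have h2 : f^[s+k] x = f^[s + (k - p)] x := by
        rw [h1, Function.iterate_add_apply, h, ← Function.iterate_add_apply]
        congr 1; omega
      rw [h2, ih (k - p) (by omega), Nat.mod_eq_sub_mod hk']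

lemma fillB_eq (a b c k1 k2 : Int) (x0 : St) (n s p : Nat) (hp : 0 < p)
    (hcyc : (stepB a b c k1 k2)^[s+p] x0 = (stepB a b c k1 k2)^[s] x0) :
    ∀ fuel m, s + p ≤ m → m ≤ n → n ≤ m + fuel →
    fillB n s p fuel ((List.range m).map (fun i => (stepB a b c k1 k2)^[i] x0)) =
      (List.range n).map (fun i => (stepB a b c k1 k2)^[i] x0) := by
  intro fuel
  induction fuel with
  | zero =>
    intro m hsp hmn hfuel
    have : m = n := by omega
    simp [fillB, this]
  | succ fuel ih =>
    intro m hsp hmn hfuel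
    by_cases hlt : m < n
    · have hlen : ((List.range m).map (fun i => (stepB a b c k1 k2)^[i] x0)).length = m := by simp
      have hidx : s + (m - s) % p < m := by
        have := Nat.mod_lt (m - s) hp; omega
      have hget : ((List.range m).map (fun i => (stepB a b c k1 k2)^[i] x0)).getD
          (s + (m - s) % p) (0, 0, 0, 0, 0, 0) = (stepB a b c k1 k2)^[m] x0 := by
        rw [List.getD_eq_getElem _ _ (by simpa using hidx)]
        simp only [List.getElem_map, List.getElem_range]
        have := iter_mod (stepB a b c k1 k2) x0 s p hp hcyc (m - s)
        rw [← this]; congr 1; omega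
      rw [fillB]
      simp only [hlen, hlt, if_pos, hget]
      have happ : (List.range m).map (fun i => (stepB a b c k1 k2)^[i] x0) ++
          [(stepB a b c k1 k2)^[m] x0] =
          (List.range (m+1)).map (fun i => (stepB a b c k1 k2)^[i] x0) := by
        rw [List.range_succ, List.map_append]; simp
      rw [happ]
      exact ih (m+1) (by omega) (by omega) (by omega)
    · have : m = n := by omega
      rw [fillB]
      simp [this]

lemma loopB_eq (a b c k1 k2 : Int) (x0 : St) (n : Nat) :
    ∀ fuel m (seen : PySem.Dict St Nat), 1 ≤ m → m ≤ n → n ≤ m + fuel →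
    (∀ z i, seen.get? z = some i → i < m ∧ (stepB a b c k1 k2)^[i] x0 = z) →
    loopB a b c k1 k2 n fuel ((List.range m).map (fun i => (stepB a b c k1 k2)^[i] x0)) seen
        ((stepB a b c k1 k2)^[m-1] x0) =
      (List.range n).map (fun i => (stepB a b c k1 k2)^[i] x0) := by
  intro fuel
  induction fuel with
  | zero =>
    intro m seen h1 hmn hfuel hseen
    have : m = n := by omega
    simp [loopB, this]
  | succ fuel ih =>
    intro m seen h1 hmn hfuel hseen
    have hlen : ((List.range m).map (fun i => (stepB a b c k1 k2)^[i] x0)).length = m := by simp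
    by_cases hlt : m < n
    · have hy : stepB a b c k1 k2 ((stepB a b c k1 k2)^[m-1] x0) = (stepB a b c k1 k2)^[m] x0 := by
        conv_rhs => rw [show m = (m-1)+1 by omega]
        rw [Function.iterate_succ_apply']
      rw [loopB]
      simp only [hlen, hlt, if_pos, hy]
      cases hg : seen.get? ((stepB a b c k1 k2)^[m] x0) with
      | some s =>
        obtain ⟨hs, hss⟩ := hseen _ _ hg
        have hp : 0 < m - s := by omega
        have hcyc : (stepB a b c k1 k2)^[s + (m - s)] x0 = (stepB a b c k1 k2)^[s] x0 := by
          rw [show s + (m - s) = m by omega, hss]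
        exact fillB_eq a b c k1 k2 x0 n s (m - s) hp hcyc (n - m) m (by omega) (by omega) (by omega)
      | none =>
        have happ : (List.range m).map (fun i => (stepB a b c k1 k2)^[i] x0) ++
            [(stepB a b c k1 k2)^[m] x0] =
            (List.range (m+1)).map (fun i => (stepB a b c k1 k2)^[i] x0) := by
          rw [List.range_succ, List.map_append]; simp
        rw [happ]
        have := ih (m+1) (seen.insert ((stepB a b c k1 k2)^[m] x0) m) (by omega) (by omega) (by omega) ?_
        · simpa using this
        · intro z i hz
          rw [PySem.Dict.get?_insert] at hz
          split at hz
          · rename_i hzz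
            cases hz
            exact ⟨by omega, hzz.symm⟩
          · obtain ⟨hi, he⟩ := hseen z i hz
            exact ⟨by omega, he⟩
    · have : m = n := by omega
      rw [loopB]
      simp [this]

-- ===== VERDICT (by name: the statement is the Claim_ definition above) =====
theorem generate_l_sequences_spec : Claim_equal_generate_l_sequences := by
  intro a b c k1 k2 InX l M N _ _
  unfold Spec_generate_l_sequences
  simp only [generate_l_sequences, generate_l_sequences_alt]
  set x0 : St := (PySem.List.pyGetD InX 0 0, PySem.List.pyGetD InX 1 0, PySem.List.pyGetD InX 2 0,
                  PySem.List.pyGetD InX 3 0, PySem.List.pyGetD InX 4 0, PySem.List.pyGetD InX 5 0) with hx0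
  set itn : Nat := (l + 2 * M * N - 1).toNat with hitn
  have hag : agrees InX x0 := by rw [hx0]; exact ⟨rfl, rfl, rfl, rfl, rfl, rfl⟩
  have hA := loopA_eq a b c k1 k2 itn InX x0 hag
    [PySem.List.pyGetD InX 0 0] [PySem.List.pyGetD InX 1 0] [PySem.List.pyGetD InX 2 0]
    [PySem.List.pyGetD InX 3 0] [PySem.List.pyGetD InX 4 0] [PySem.List.pyGetD InX 5 0]
  have hB := loopB_eq a b c k1 k2 x0 (1 + itn) (1 + itn) 1 (PySem.Dict.empty.insert x0 0)
    (by omega) (by omega) (by omega) ?_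
  · have hinit : (List.range 1).map (fun i => (stepB a b c k1 k2)^[i] x0) = [x0] := by simp
    rw [hinit] at hB
    simp only [Function.iterate_zero_apply, show (1:Nat) - 1 = 0 from rfl] at hB
    rw [hA, hB]
    rw [← cons_iterSt a b c k1 k2 itn x0]
    simp
    exact hag
  · intro z i hz
    rw [PySem.Dict.get?_insert] at hz
    split at hz
    · rename_i hzz
      cases hz
      exact ⟨by omega, hzz.symm⟩
    · rw [PySem.Dict.get?_empty] at hz
      cases hz
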